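-- pv_equiv track=rewrite | github.com/chrismoroney/advent-of-code-2024 | Q1/code_part2.py | count_similarity_score
-- ===== SOURCE A (Python) =====
-- def count_similarity_score(first_group, second_group):
--     second_group_map = {}
--     scores = []
--
--     for i in range(len(second_group)):
--         if second_group[i] not in second_group_map:
--             second_group_map[second_group[i]] = 1
--         else:
--             second_group_map[second_group[i]] += 1
--
--     for j in range(len(first_group)):
--         if first_group[j] in second_group_map:
--             score = first_group[j] * second_group_map[first_group[j]]
--             scores.append(score)
--
--     return scores
-- ===== SOURCE B (Python) =====
-- def count_similarity_score(first_group, second_group):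
--     # Transposed iteration: scatter each second_group element's contribution
--     # into position-aligned totals over first_group, then compact.
--     totals = [0] * len(first_group)
--     present = [False] * len(first_group)
--     for y in second_group:
--         for i, x in enumerate(first_group):
--             if x == y:
--                 totals[i] += y
--                 present[i] = True
--     return [t for t, p in zip(totals, present) if p]
-- ===== Notes on version B (the rewrite author's own statement) =====
-- stated objective: alternative
-- what changed: Inverts the loop structure: instead of building a count map and then looking each first_group element up, B iterates over second_group and scatters each element's contribution into position-aligned totals/present accumulators over first_group, then compacts the flagged positions; no count map or per-element counting exists.
import Mathlib
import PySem

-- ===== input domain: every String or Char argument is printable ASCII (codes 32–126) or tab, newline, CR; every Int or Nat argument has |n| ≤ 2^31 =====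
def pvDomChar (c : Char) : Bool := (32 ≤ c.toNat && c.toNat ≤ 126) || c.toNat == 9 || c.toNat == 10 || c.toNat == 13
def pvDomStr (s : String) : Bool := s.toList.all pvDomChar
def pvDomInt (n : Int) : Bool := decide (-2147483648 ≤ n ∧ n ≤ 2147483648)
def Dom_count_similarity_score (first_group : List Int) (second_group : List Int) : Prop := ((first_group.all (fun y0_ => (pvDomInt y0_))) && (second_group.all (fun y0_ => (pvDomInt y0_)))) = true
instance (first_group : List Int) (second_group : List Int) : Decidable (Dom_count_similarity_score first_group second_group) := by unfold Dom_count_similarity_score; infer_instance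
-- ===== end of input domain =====

-- B inverts the loop structure: it scatters each second_group element's contribution into
-- position-aligned totals/present accumulators over first_group, then compacts (alternative; not faster).

-- ===== PORT A =====
def count_similarity_score (first_group : List Int) (second_group : List Int) : List Int :=
  let second_group_map : PySem.Dict Int Int :=
    (PySem.List.pyRange 0 (second_group.length : Int) 1).foldl
      (fun d i =>
        let x := PySem.List.pyGetD second_group i 0
        if ¬ (d.contains x = true) then d.insert x 1
        else d.insert x (d.getD x 0 + 1))
      PySem.Dict.empty
  (PySem.List.pyRange 0 (first_group.length : Int) 1).foldl
    (fun scores j =>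
      let x := PySem.List.pyGetD first_group j 0
      if second_group_map.contains x then
        scores ++ [x * second_group_map.getD x 0]
      else scores)
    []

-- ===== PORT B =====
-- state: (totals, present) kept as one list of pairs aligned with first_group;
-- the inner 'for i, x in enumerate(first_group)' pointwise update is the map over the zip.
def count_similarity_score_alt (first_group : List Int) (second_group : List Int) : List Int :=
  let init : List (Int × Bool) := first_group.map (fun _ => ((0 : Int), false))
  let fin := second_group.foldl
    (fun st y =>
      (first_group.zip st).map (fun xs => if xs.1 = y then (xs.2.1 + y, true) else xs.2))
    init
  fin.filterMap (fun tp => if tp.2 then some tp.1 else none)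

-- ===== PRECONDITION & SPEC =====
def Spec_count_similarity_score (first_group : List Int) (second_group : List Int) (out : List Int) : Prop := out = count_similarity_score_alt first_group second_group
instance (first_group : List Int) (second_group : List Int) (out : List Int) : Decidable (Spec_count_similarity_score first_group second_group out) := by unfold Spec_count_similarity_score; infer_instance

-- ===== CLAIM (what is proved, stated in full; the proofs are below) =====
def Claim_equal_count_similarity_score : Prop := ∀ (first_group : List Int) (second_group : List Int), Dom_count_similarity_score first_group second_group → Spec_count_similarity_score first_group second_group (count_similarity_score first_group second_group)

-- ===== LEMMAS AND PROOFS =====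

-- A's first loop builds exactly Counter(second_group): both branches are
-- 'insert x (getD x 0 + 1)' since getD x 0 = 0 when the key is absent.
theorem pv_counter_loop (l : List Int) :
    l.foldl
      (fun (d : PySem.Dict Int Int) x =>
        if ¬ (d.contains x = true) then d.insert x 1
        else d.insert x (d.getD x 0 + 1))
      PySem.Dict.empty = PySem.Dict.counter l := by
  rw [← PySem.Dict.foldl_insert_getD_add_one_eq_counter]
  congr 1
  funext d x
  by_cases h : d.contains x = true
  · simp [h]
  · have h0 : d.getD x 0 = 0 := by
      have := PySem.Dict.contains_eq_isSome_get? (d := d) (k := x)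
      cases hg : d.get? x with
      | none => simp [PySem.Dict.getD, hg]
      | some v => rw [hg] at this; simp [this] at h
    simp [h, h0]

-- the accumulating append-if loop is a filterMap
theorem pv_foldl_append_if_eq_filterMap (l acc : List Int)
    (p : Int → Bool) (f : Int → Int) :
    l.foldl (fun scores x => if p x then scores ++ [f x] else scores) acc
      = acc ++ l.filterMap (fun x => if p x then some (f x) else none) := by
  induction l generalizing acc with
  | nil => simp
  | cons y ys ih =>
    by_cases h : p y
    · simp [List.foldl_cons, h, ih]
    · simp [List.foldl_cons, h, ih]

-- zipping a list with a pointwise image of itself and mapping is a single map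
theorem pv_zip_self_map {β γ : Type} (f : List Int) (g : Int → β) (h : Int × β → γ) :
    (f.zip (f.map g)).map h = f.map (fun x => h (x, g x)) := by
  induction f with
  | nil => simp
  | cons a t ih => simp [ih]

-- invariant of B's scatter loop: starting from a pointwise state over first_group,
-- folding over s adds x * (count of x in s) to the total and ORs in membership.
theorem pv_scatter_inv (s f : List Int) (t : Int → Int) (p : Int → Bool) :
    s.foldl
      (fun (st : List (Int × Bool)) y =>
        (f.zip st).map (fun xs => if xs.1 = y then (xs.2.1 + y, true) else xs.2))
      (f.map (fun x => (t x, p x)))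
      = f.map (fun x => (t x + x * (s.count x : Int), p x || s.contains x)) := by
  induction s generalizing t p with
  | nil => simp
  | cons y ys ih =>
    rw [List.foldl_cons,
        pv_zip_self_map f (fun x => (t x, p x))
          (fun xs => if xs.1 = y then (xs.2.1 + y, true) else xs.2)]
    have hstep :
        (f.map (fun x => if x = y then (t x + y, true) else (t x, p x)))
          = f.map (fun x => ((fun x => if x = y then t x + y else t x) x,
                             (fun x => p x || (x == y)) x)) := by
      apply List.map_congr_left
      intro x _
      by_cases h : x = y <;> simp [h]
    rw [hstep, ih]
    apply List.map_congr_left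
    intro x _
    by_cases h : x = y
    · subst h
      simp [mul_add]
      ring
    · have hb : (x == y) = false := beq_eq_false_iff_ne.mpr h
      simp [hb, h]
      left
      simp [List.count_cons]
      exact Ne.symm h

-- ===== VERDICT (by name: the statement is the Claim_ definition above) =====
theorem count_similarity_score_spec : Claim_equal_count_similarity_score := by
  intro first_group second_group _
  unfold Spec_count_similarity_score count_similarity_score count_similarity_score_alt
  dsimp only
  rw [PySem.List.foldl_pyRange_zero_pyGetD' second_group 0
        (fun (d : PySem.Dict Int Int) x =>
          if ¬ (d.contains x = true) then d.insert x 1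
          else d.insert x (d.getD x 0 + 1)) PySem.Dict.empty]
  rw [pv_counter_loop]
  simp only [PySem.Dict.contains_counter, PySem.Dict.getD_counter]
  rw [PySem.List.foldl_pyRange_zero_pyGetD' first_group 0
        (fun scores x => if second_group.contains x = true
          then scores ++ [x * (second_group.count x : Int)] else scores) []]
  rw [pv_foldl_append_if_eq_filterMap first_group []
        (fun x => second_group.contains x)
        (fun x => x * (second_group.count x : Int))]
  have hinit : (first_group.map (fun _ => ((0 : Int), false)))
      = first_group.map (fun x => ((fun _ => (0 : Int)) x, (fun _ => false) x)) := rfl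
  rw [hinit, pv_scatter_inv second_group first_group (fun _ => 0) (fun _ => false)]
  rw [List.filterMap_map]
  simp [Function.comp]
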